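-- pv_equiv track=rewrite | github.com/F3zzyy/wel-to-calendar | generate_ics_from_json.py | fold_line
-- ===== SOURCE A (Python) =====
-- def fold_line(line: str) -> str:
--     """Składa długie linie ICS (RFC 5545: max 75 oktetów)."""
--     if len(line.encode("utf-8")) <= 75:
--         return line
--     result = []
--     current = ""
--     for char in line:
--         if len((current + char).encode("utf-8")) > 75:
--             result.append(current)
--             current = " " + char
--         else:
--             current += char
--     if current:
--         result.append(current)
--     return "\r\n".join(result)
-- ===== SOURCE B (Python) =====
-- def fold_line(line: str) -> str:
--     """Składa długie linie ICS (RFC 5545: max 75 oktetów) przez krojenie na plasterki."""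
--     if len(line.encode("utf-8")) <= 75:
--         return line
--     parts = [line[:75]]
--     i = 75
--     while i < len(line):
--         parts.append(" " + line[i:i + 74])
--         i += 74
--     return "\r\n".join(parts)
-- ===== Notes on version B (the rewrite author's own statement) =====
-- stated objective: faster
-- what changed: B replaces A's char-by-char loop that re-encodes the growing chunk on every character with direct slicing: one 75-char slice then 74-char slices, O(n) instead of O(n^2).
import Mathlib
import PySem

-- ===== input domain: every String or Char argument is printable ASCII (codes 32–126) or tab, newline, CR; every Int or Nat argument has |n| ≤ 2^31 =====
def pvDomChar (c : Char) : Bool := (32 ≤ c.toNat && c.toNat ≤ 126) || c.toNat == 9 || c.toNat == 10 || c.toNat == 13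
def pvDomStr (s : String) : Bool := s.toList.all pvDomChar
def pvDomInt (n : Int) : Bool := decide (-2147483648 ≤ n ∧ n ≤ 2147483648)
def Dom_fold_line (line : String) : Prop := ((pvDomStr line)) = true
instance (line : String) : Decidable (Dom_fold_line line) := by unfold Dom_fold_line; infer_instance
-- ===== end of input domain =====

-- B replaces A's quadratic char-by-char accumulation (re-encoding the growing chunk each step)
-- with direct slicing: one 75-char head slice then 74-char slices, an asymptotically faster O(n) pass.


-- ===== PORT A =====
-- On the stated domain (ASCII 32–126, tab, LF, CR) every character is one UTF-8 octet,
-- so len(x.encode("utf-8")) is ported exactly as the character-list length.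
def foldLineStep (st : List (List Char) × List Char) (c : Char) : List (List Char) × List Char :=
  if (st.2 ++ [c]).length > 75 then (st.1 ++ [st.2], [' ', c])
  else (st.1, st.2 ++ [c])

def fold_line (line : String) : String :=
  let cs := line.toList
  if cs.length ≤ 75 then line
  else
    let st := cs.foldl foldLineStep ([], [])
    let result := if st.2 ≠ [] then st.1 ++ [st.2] else st.1
    String.intercalate "\r\n" (result.map String.ofList)

-- ===== PORT B =====
-- the while loop of Source B: each iteration emits " " + line[i:i+74] and advances i by 74
def foldChunks : List Char → List (List Char)
  | [] => []
  | c :: t => (' ' :: (c :: t).take 74) :: foldChunks ((c :: t).drop 74)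
  termination_by l => l.length
  decreasing_by simp

def fold_line_alt (line : String) : String :=
  let cs := line.toList
  if cs.length ≤ 75 then line
  else String.intercalate "\r\n" ((cs.take 75 :: foldChunks (cs.drop 75)).map String.ofList)

-- ===== PRECONDITION & SPEC =====
def Spec_fold_line (line : String) (out : String) : Prop := out = fold_line_alt line
instance (line : String) (out : String) : Decidable (Spec_fold_line line out) := by unfold Spec_fold_line; infer_instance

-- ===== CLAIM (what is proved, stated in full; the proofs are below) =====
def Claim_equal_fold_line : Prop := ∀ (line : String), Dom_fold_line line → Spec_fold_line line (fold_line line)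

-- ===== LEMMAS AND PROOFS =====

-- the accumulation phase: while the current chunk stays within 75 chars, the fold just appends
lemma foldl_grow (l : List Char) : ∀ (res : List (List Char)) (cur : List Char),
    cur.length + l.length ≤ 75 →
    l.foldl foldLineStep (res, cur) = (res, cur ++ l) := by
  induction l with
  | nil => simp
  | cons c t ih =>
    intro res cur h
    simp only [List.foldl_cons, foldLineStep]
    rw [if_neg (by simp at h ⊢; omega)]
    rw [ih res (cur ++ [c]) (by simp at h ⊢; omega)]
    simp

-- the steady state: from a full (75-char) chunk, the fold produces exactly B's chunk list
lemma foldl_chunks (n : Nat) : ∀ (l : List Char), l.length = n →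
    ∀ (res : List (List Char)) (cur : List Char), cur.length = 75 →
    (let st := l.foldl foldLineStep (res, cur)
     if st.2 ≠ [] then st.1 ++ [st.2] else st.1) = res ++ cur :: foldChunks l := by
  induction n using Nat.strong_induction_on with
  | _ n ih =>
    intro l hl res cur hcur
    match l with
    | [] =>
      have hc : cur ≠ [] := by intro e; rw [e] at hcur; simp at hcur
      simp [foldChunks, hc]
    | c :: t =>
      simp only [List.foldl_cons]
      rw [show foldLineStep (res, cur) c = (res ++ [cur], [' ', c]) from by
        simp [foldLineStep, hcur]]
      by_cases ht : t.length ≤ 73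
      · rw [foldl_grow t (res ++ [cur]) [' ', c] (by simp; omega)]
        have hdrop : (c :: t).drop 74 = [] := by
          apply List.drop_eq_nil_of_le; simp; omega
        have htake : (c :: t).take 74 = c :: t := by
          apply List.take_of_length_le; simp; omega
        simp [foldChunks, hdrop, htake]
      · -- split t = take 73 ++ drop 73; grow over the first 73, recurse on the rest
        have hsplit : t = t.take 73 ++ t.drop 73 := (List.take_append_drop 73 t).symm
        conv_lhs => rw [hsplit]
        rw [List.foldl_append]
        rw [foldl_grow (t.take 73) (res ++ [cur]) [' ', c]
          (by simp [List.length_take]; omega)]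
        have hlen : (t.drop 73).length < n := by
          simp [List.length_drop] at hl ⊢; omega
        have hrec := ih (t.drop 73).length hlen (t.drop 73) rfl (res ++ [cur])
          (' ' :: c :: t.take 73) (by simp [List.length_take]; omega)
        simp only [] at hrec
        have hstate : ([' ', c] ++ t.take 73) = (' ' :: c :: t.take 73) := by simp
        rw [hstate, hrec]
        have htake : (c :: t).take 74 = c :: t.take 73 := by simp
        have hdrop : (c :: t).drop 74 = t.drop 73 := by simp
        simp [foldChunks, htake, hdrop]

-- ===== VERDICT (by name: the statement is the Claim_ definition above) =====
theorem fold_line_spec : Claim_equal_fold_line := by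
  intro line _
  unfold Spec_fold_line fold_line fold_line_alt
  dsimp only []
  by_cases h : line.toList.length ≤ 75
  · rw [if_pos h, if_pos h]
  · rw [if_neg h, if_neg h]
    have h' : ¬ line.length ≤ 75 := by simpa using h
    have hsplit : line.toList = line.toList.take 75 ++ line.toList.drop 75 :=
      (List.take_append_drop 75 line.toList).symm
    conv_lhs => rw [hsplit]
    rw [List.foldl_append,
      foldl_grow (line.toList.take 75) [] [] (by simp [List.length_take])]
    have hgrown : (([] : List Char) ++ line.toList.take 75) = line.toList.take 75 := by simp
    rw [hgrown]
    have hrec := foldl_chunks (line.toList.drop 75).length (line.toList.drop 75) rfl []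
      (line.toList.take 75) (by simp [List.length_take]; omega)
    simp only [] at hrec
    rw [hrec]
    simp
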